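-- pv_equiv track=rewrite | github.com/RUCAIBox/JiuZhang | models/data_utils.py | get_formula_split
-- ===== SOURCE A (Python) =====
-- def get_formula_split(sen, sep_id):
--     f_len, f_idx = [], []
--     in_formula = False
--     curr_len = 0
--     for tok in sen:
--         if tok == sep_id:
--             if in_formula:
--                 f_idx.append(len(f_len))
--                 f_len.append(curr_len+1)
--                 in_formula = False
--                 curr_len = 0
--             else:
--                 if curr_len != 0:
--                     f_len.append(curr_len)
--                 curr_len = 1
--                 in_formula = True
--         else:
--             curr_len += 1
--     if curr_len != 0:
--         f_len.append(curr_len)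
--     assert not in_formula
--     return f_len, f_idx
-- ===== SOURCE B (Python) =====
-- def get_formula_split(sen, sep_id):
--     pos = [i for i, tok in enumerate(sen) if tok == sep_id]
--     assert len(pos) % 2 == 0
--     f_len, f_idx = [], []
--     prev = 0
--     for k in range(0, len(pos), 2):
--         open_p, close_p = pos[k], pos[k + 1]
--         if open_p - prev != 0:
--             f_len.append(open_p - prev)
--         f_idx.append(len(f_len))
--         f_len.append(close_p - open_p + 1)
--         prev = close_p + 1
--     if len(sen) - prev != 0:
--         f_len.append(len(sen) - prev)
--     return f_len, f_idx
-- ===== Notes on version B (the rewrite author's own statement) =====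
-- stated objective: alternative
-- what changed: B replaces A's token-by-token state machine (in_formula flag, running curr_len) by first collecting all separator indices in one pass and then looping over consecutive index pairs with a prev cursor, computing segment lengths by index arithmetic.
import Mathlib
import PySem

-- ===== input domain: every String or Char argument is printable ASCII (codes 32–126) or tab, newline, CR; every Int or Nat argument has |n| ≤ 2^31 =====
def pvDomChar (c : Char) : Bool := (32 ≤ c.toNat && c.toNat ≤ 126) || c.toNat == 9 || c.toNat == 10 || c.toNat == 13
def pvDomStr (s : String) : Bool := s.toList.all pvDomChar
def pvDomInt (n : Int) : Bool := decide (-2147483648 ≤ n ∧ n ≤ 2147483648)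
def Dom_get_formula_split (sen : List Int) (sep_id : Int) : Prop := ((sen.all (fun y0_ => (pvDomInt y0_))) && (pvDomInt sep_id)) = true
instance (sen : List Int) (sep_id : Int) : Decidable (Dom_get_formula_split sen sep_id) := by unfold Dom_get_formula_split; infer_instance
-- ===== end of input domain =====

-- B collects all separator indices in one pass and walks consecutive index pairs with a
-- prev cursor (index arithmetic) instead of A's token-by-token in_formula state machine;
-- same O(n) cost, different decomposition. Pre_ excludes inputs with an odd number of
-- sep_id occurrences, on which A raises AssertionError (B's assert raises there too).


-- ===== PORT A =====
-- one loop step of A: state (f_len, f_idx, in_formula, curr_len)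
def stepA (sep_id : Int) (st : List Int × List Int × Bool × Int) (tok : Int) :
    List Int × List Int × Bool × Int :=
  let (f_len, f_idx, in_formula, curr_len) := st
  if tok == sep_id then
    if in_formula then
      (f_len ++ [curr_len + 1], f_idx ++ [(f_len.length : Int)], false, 0)
    else
      ((if curr_len ≠ 0 then f_len ++ [curr_len] else f_len), f_idx, true, 1)
  else
    (f_len, f_idx, in_formula, curr_len + 1)

def get_formula_split (sen : List Int) (sep_id : Int) : List Int × List Int :=
  let st := sen.foldl (stepA sep_id) ([], [], false, 0)
  let (f_len, f_idx, _, curr_len) := st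
  ((if curr_len ≠ 0 then f_len ++ [curr_len] else f_len), f_idx)

-- ===== PORT B =====
-- the 'for k in range(0, len(pos), 2)' loop of B: consumes separator indices pairwise,
-- carries (f_len, f_idx, prev); returns the state after the loop
def bLoop (ps : List Int) (prev : Int) (f_len f_idx : List Int) :
    List Int × List Int × Int :=
  match ps with
  | open_p :: close_p :: rest =>
      let f_len1 := if open_p - prev ≠ 0 then f_len ++ [open_p - prev] else f_len
      bLoop rest (close_p + 1) (f_len1 ++ [close_p - open_p + 1])
        (f_idx ++ [(f_len1.length : Int)])
  | _ => (f_len, f_idx, prev)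

def get_formula_split_alt (sen : List Int) (sep_id : Int) : List Int × List Int :=
  let pos := ((PySem.List.enumerate sen).filter (fun p => p.2 == sep_id)).map (fun p => p.1)
  let (f_len, f_idx, prev) := bLoop pos 0 [] []
  ((if (sen.length : Int) - prev ≠ 0 then f_len ++ [(sen.length : Int) - prev] else f_len), f_idx)

-- ===== PRECONDITION & SPEC =====
-- Pre_ excludes inputs with an odd number of sep_id occurrences: there A's trailing
-- 'assert not in_formula' raises AssertionError (B's assert raises there too).
def Pre_get_formula_split (sen : List Int) (sep_id : Int) : Prop :=
  sen.count sep_id % 2 = 0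
instance (sen : List Int) (sep_id : Int) : Decidable (Pre_get_formula_split sen sep_id) := by
  unfold Pre_get_formula_split; infer_instance

def pvWitness_get_formula_split : List Int × Int := ([3, 0, 5, 0, 7], 0)

def Spec_get_formula_split (sen : List Int) (sep_id : Int) (out : List Int × List Int) : Prop := out = get_formula_split_alt sen sep_id
instance (sen : List Int) (sep_id : Int) (out : List Int × List Int) : Decidable (Spec_get_formula_split sen sep_id out) := by unfold Spec_get_formula_split; infer_instance

-- ===== CLAIM (what is proved, stated in full; the proofs are below) =====
def Claim_equal_get_formula_split : Prop := ∀ (sen : List Int) (sep_id : Int), Dom_get_formula_split sen sep_id → Pre_get_formula_split sen sep_id → Spec_get_formula_split sen sep_id (get_formula_split sen sep_id)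

-- ===== LEMMAS AND PROOFS =====

-- absolute indices (starting at n) of the occurrences of s in a list
def posFrom (s : Int) (n : Int) : List Int → List Int
  | [] => []
  | t :: ts => if t = s then n :: posFrom s (n + 1) ts else posFrom s (n + 1) ts

lemma pos_eq_posFrom (s : Int) (sen : List Int) (n : Int) :
    ((PySem.List.enumerate sen n).filter (fun p => p.2 == s)).map (fun p => p.1)
      = posFrom s n sen := by
  induction sen generalizing n with
  | nil => simp [PySem.List.enumerate_nil, posFrom]
  | cons t ts ih =>
      by_cases h : t = s <;>
        simp [PySem.List.enumerate_cons, posFrom, h, ih]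

lemma posFrom_nil_iff (s : Int) (l : List Int) : ∀ n, posFrom s n l = [] ↔ l.count s = 0 := by
  induction l with
  | nil => intro n; simp [posFrom]
  | cons u us ih =>
      intro n
      by_cases hu : u = s
      · subst hu; simp [posFrom]
      · simp [posFrom, hu, ih]

-- finalize A's state
def finA (st : List Int × List Int × Bool × Int) : List Int × List Int :=
  ((if st.2.2.2 ≠ 0 then st.1 ++ [st.2.2.2] else st.1), st.2.1)

-- finalize B's state at absolute end index `lim`
def finB (st : List Int × List Int × Int) (lim : Int) : List Int × List Int :=
  ((if lim - st.2.2 ≠ 0 then st.1 ++ [lim - st.2.2] else st.1), st.2.1)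

lemma a_eq (sen : List Int) (s : Int) :
    get_formula_split sen s = finA (sen.foldl (stepA s) ([], [], false, 0)) := by
  unfold get_formula_split
  rcases sen.foldl (stepA s) ([], [], false, (0 : Int)) with ⟨a, b, c, d⟩
  rfl

lemma alt_eq (sen : List Int) (s : Int) :
    get_formula_split_alt sen s = finB (bLoop (posFrom s 0 sen) 0 [] []) (sen.length : Int) := by
  unfold get_formula_split_alt
  rw [pos_eq_posFrom]
  rcases h : bLoop (posFrom s 0 sen) 0 [] [] with ⟨a, b, pr⟩
  simp [h, finB]

-- main invariant, in both loop modes simultaneously.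
-- text mode: curr_len = c tokens seen since the cursor, so prev = n - c.
-- formula mode: curr_len = c counts tokens since the opening sep inclusive.
lemma main_inv (s : Int) (sen : List Int) :
    (∀ (n c : Int) (fl fi : List Int), sen.count s % 2 = 0 →
      finA (sen.foldl (stepA s) (fl, fi, false, c))
        = finB (bLoop (posFrom s n sen) (n - c) fl fi) (n + sen.length)) ∧
    (∀ (n c : Int) (fl fi : List Int), sen.count s % 2 = 1 →
      ∀ p rest, posFrom s n sen = p :: rest →
      finA (sen.foldl (stepA s) (fl, fi, true, c))
        = finB (bLoop rest (p + 1) (fl ++ [c + (p - n) + 1]) (fi ++ [(fl.length : Int)]))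
            (n + sen.length)) := by
  induction sen with
  | nil =>
      constructor
      · intro n c fl fi _
        show finA (fl, fi, false, c) = finB (fl, fi, n - c) (n + (([] : List Int).length : Int))
        have h1 : n + (([] : List Int).length : Int) - (n - c) = c := by simp
        simp only [finA, finB, h1]
      · intro n c fl fi h
        simp at h
  | cons t ts ih =>
      obtain ⟨ihT, ihF⟩ := ih
      constructor
      · -- text mode
        intro n c fl fi hcnt
        by_cases h : t = s
        · -- opening separator
          subst h
          have hcnt' : ts.count t % 2 = 1 := by
            simp at hcnt ⊢; omega
          obtain ⟨p, rest, hpr⟩ : ∃ p rest, posFrom t (n + 1) ts = p :: rest := by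
            cases hpe : posFrom t (n + 1) ts with
            | nil => exact absurd ((posFrom_nil_iff t ts (n + 1)).1 hpe) (by omega)
            | cons a b => exact ⟨a, b, rfl⟩
          have hstep : List.foldl (stepA t) (fl, fi, false, c) (t :: ts)
              = List.foldl (stepA t) ((if c ≠ 0 then fl ++ [c] else fl), fi, true, 1) ts := by
            simp [stepA]
          have hpos : posFrom t n (t :: ts) = n :: posFrom t (n + 1) ts := by
            simp [posFrom]
          rw [hstep, hpos, hpr]
          have hb : bLoop (n :: p :: rest) (n - c) fl fi
              = bLoop rest (p + 1) ((if c ≠ 0 then fl ++ [c] else fl) ++ [p - n + 1])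
                  (fi ++ [((if c ≠ 0 then fl ++ [c] else fl).length : Int)]) := by
            simp only [bLoop]
            have h2 : n - (n - c) = c := by ring
            rw [h2]
          rw [hb]
          have hthis := ihF (n + 1) 1 (if c ≠ 0 then fl ++ [c] else fl) fi hcnt' p rest hpr
          rw [show (1 : Int) + (p - (n + 1)) + 1 = p - n + 1 by ring] at hthis
          rw [show n + 1 + (ts.length : Int) = n + ((t :: ts).length : Int) by push_cast [List.length_cons]; ring] at hthis
          exact hthis
        · -- plain text token
          have hcnt' : ts.count s % 2 = 0 := by
            simpa [List.count_cons, h] using hcnt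
          have hstep : List.foldl (stepA s) (fl, fi, false, c) (t :: ts)
              = List.foldl (stepA s) (fl, fi, false, c + 1) ts := by
            simp [stepA, h]
          have hpos : posFrom s n (t :: ts) = posFrom s (n + 1) ts := by
            simp [posFrom, h]
          rw [hstep, hpos]
          have hthis := ihT (n + 1) (c + 1) fl fi hcnt'
          rw [show n + 1 - (c + 1) = n - c by ring] at hthis
          rw [show n + 1 + (ts.length : Int) = n + ((t :: ts).length : Int) by push_cast [List.length_cons]; ring] at hthis
          exact hthis
      · -- formula mode
        intro n c fl fi hcnt p rest hpr
        by_cases h : t = s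
        · -- closing separator
          subst h
          have hcnt' : ts.count t % 2 = 0 := by
            simp at hcnt ⊢; omega
          have hpr2 : n = p ∧ posFrom t (n + 1) ts = rest := by
            simpa [posFrom] using hpr
          obtain ⟨rfl, hrest⟩ := hpr2
          have hstep : List.foldl (stepA t) (fl, fi, true, c) (t :: ts)
              = List.foldl (stepA t) (fl ++ [c + 1], fi ++ [(fl.length : Int)], false, 0) ts := by
            simp [stepA]
          rw [hstep, show c + (n - n) + 1 = c + 1 by ring, ← hrest]
          have hthis := ihT (n + 1) 0 (fl ++ [c + 1]) (fi ++ [(fl.length : Int)]) hcnt'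
          rw [show n + 1 - (0 : Int) = n + 1 by ring] at hthis
          rw [show n + 1 + (ts.length : Int) = n + ((t :: ts).length : Int) by push_cast [List.length_cons]; ring] at hthis
          exact hthis
        · -- token inside the formula
          have hcnt' : ts.count s % 2 = 1 := by
            simpa [List.count_cons, h] using hcnt
          have hpr' : posFrom s (n + 1) ts = p :: rest := by
            simpa [posFrom, h] using hpr
          have hstep : List.foldl (stepA s) (fl, fi, true, c) (t :: ts)
              = List.foldl (stepA s) (fl, fi, true, c + 1) ts := by
            simp [stepA, h]
          rw [hstep, show c + (p - n) + 1 = c + 1 + (p - (n + 1)) + 1 by ring]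
          have hthis := ihF (n + 1) (c + 1) fl fi hcnt' p rest hpr'
          rw [show n + 1 + (ts.length : Int) = n + ((t :: ts).length : Int) by push_cast [List.length_cons]; ring] at hthis
          exact hthis

-- ===== VERDICT (by name: the statement is the Claim_ definition above) =====
theorem get_formula_split_spec : Claim_equal_get_formula_split := by
  intro sen sep_id _ hpre
  unfold Spec_get_formula_split
  rw [a_eq, alt_eq]
  have hmain := (main_inv sep_id sen).1 0 0 [] [] hpre
  simpa using hmain
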